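-- pv_equiv track=rewrite | github.com/domenicvacanti/Computer-Science-Fundamentals | DiscussionAssignments/ds3.py | part6
-- ===== SOURCE A (Python) =====
-- def part6(inputString, charsToIgnore):
--     lastChar1 = ''
--     lastChar2 = ''
--     index = 0
--     for char in inputString:
--         if char not in charsToIgnore:
--             lastChar2 = char
--         else:
--             None
--         if lastChar2 > lastChar1:
--             lastChar1 = lastChar2
--         else:
--             None
--     if lastChar1 == '':
--         return None, None
--     else:
--         for char in inputString:
--             if lastChar1 == char:
--                 indexOfChar = index
--                 break
--             else:
--                 index = index + 1
--     return lastChar1, indexOfChar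
-- ===== SOURCE B (Python) =====
-- def part6(inputString, charsToIgnore):
--     # One pass: map each non-ignored char to the index of its first occurrence,
--     # then take the max key and its stored index.
--     first = {}
--     for i, ch in enumerate(inputString):
--         if ch not in charsToIgnore and ch not in first:
--             first[ch] = i
--     if not first:
--         return None, None
--     m = max(first)
--     return m, first[m]
-- ===== Notes on version B (the rewrite author's own statement) =====
-- stated objective: simpler
-- what changed: Replaces A's running-max scan plus a second index-hunting scan (with leftover loop state) by a single pass that records each non-ignored character's first index in a dict, then returns the max key and its stored index.
import Mathlib
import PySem

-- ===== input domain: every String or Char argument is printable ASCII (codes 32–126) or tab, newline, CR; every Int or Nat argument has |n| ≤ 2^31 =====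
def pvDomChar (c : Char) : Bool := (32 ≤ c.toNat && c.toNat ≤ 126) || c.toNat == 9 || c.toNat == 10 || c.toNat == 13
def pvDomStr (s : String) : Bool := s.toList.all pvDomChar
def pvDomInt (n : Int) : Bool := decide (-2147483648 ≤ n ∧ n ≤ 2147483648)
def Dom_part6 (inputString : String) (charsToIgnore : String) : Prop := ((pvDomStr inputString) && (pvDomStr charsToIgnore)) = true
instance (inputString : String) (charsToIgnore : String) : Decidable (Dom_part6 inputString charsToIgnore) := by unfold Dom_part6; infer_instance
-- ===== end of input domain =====

-- B replaces A's running-max scan plus second index-hunting scan by one first-index table pass; equivalence of return values proved on all inputs.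

-- ===== PORT A =====
-- A's lastChar1/lastChar2 hold either '' or a single character: modelled as Option Char
-- (none = ''); Python's string '>' on such values is pyGtOpt ('' is below every char,
-- single-char strings compare by code point, exactly Lean's Char '<').
def pyGtOpt : Option Char → Option Char → Bool
  | some x, some y => decide (y < x)
  | some _, none => true
  | none, _ => false

-- A's second loop: running index, stop at the first match.  The [] case is unreachable
-- (A reaches the loop only when c occurs in the string); Python would leave indexOfChar
-- unbound there.
def part6FindIdx (c : Char) : List Char → Int → Int
  | [], idx => idx
  | ch :: t, idx => if c = ch then idx else part6FindIdx c t (idx + 1)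

def part6 (inputString : String) (charsToIgnore : String) : Option String × Option Int :=
  -- 'char not in charsToIgnore' for a single char is exactly char list membership
  let st := inputString.toList.foldl (fun (s : Option Char × Option Char) ch =>
    let l2 := if ch ∈ charsToIgnore.toList then s.2 else some ch
    let l1 := if pyGtOpt l2 s.1 then l2 else s.1
    (l1, l2)) (none, none)
  match st.1 with
  | none => (none, none)
  | some c => (some (String.ofList [c]), some (part6FindIdx c inputString.toList 0))

-- ===== PORT B =====
def part6_alt (inputString : String) (charsToIgnore : String) : Option String × Option Int :=
  let first := (PySem.List.enumerate inputString.toList).foldl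
    (fun (d : PySem.Dict Char Int) p =>
      if p.2 ∉ charsToIgnore.toList ∧ d.contains p.2 = false then d.insert p.2 p.1 else d)
    PySem.Dict.empty
  match PySem.List.max? first.keys (fun k => k) with
  | none => (none, none)                                        -- 'if not first'
  | some m => (some (String.ofList [m]), some (first.getD m 0))     -- m is a key, so first[m] = getD m

-- ===== PRECONDITION & SPEC =====
def Spec_part6 (inputString : String) (charsToIgnore : String) (out : Option String × Option Int) : Prop := out = part6_alt inputString charsToIgnore
instance (inputString : String) (charsToIgnore : String) (out : Option String × Option Int) : Decidable (Spec_part6 inputString charsToIgnore out) := by unfold Spec_part6; infer_instance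

-- ===== CLAIM (what is proved, stated in full; the proofs are below) =====
def Claim_equal_part6 : Prop := ∀ (inputString : String) (charsToIgnore : String), Dom_part6 inputString charsToIgnore → Spec_part6 inputString charsToIgnore (part6 inputString charsToIgnore)

-- ===== LEMMAS AND PROOFS =====

-- running max step extracted from A's fold
def maxStep (a : Option Char) (c : Char) : Option Char :=
  if pyGtOpt (some c) a then some c else a

-- A's fold, started from an invariant state (lastChar2 ≤ lastChar1), computes in its
-- first component the running max of the non-ignored characters.
theorem part6A_fold (G : List Char) (l : List Char) (a b : Option Char)
    (h : pyGtOpt b a = false) :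
    (l.foldl (fun (s : Option Char × Option Char) ch =>
      let l2 := if ch ∈ G then s.2 else some ch
      let l1 := if pyGtOpt l2 s.1 then l2 else s.1
      (l1, l2)) (a, b)).1
    = (l.filter (fun c => decide (c ∉ G))).foldl maxStep a := by
  induction l generalizing a b with
  | nil => rfl
  | cons ch t ih =>
    simp only [List.foldl_cons, List.filter_cons]
    by_cases hg : ch ∈ G
    · have hbody := ih a b h
      simpa [hg, h] using hbody
    · have hinv : pyGtOpt (some ch) (if pyGtOpt (some ch) a then some ch else a) = false := by
        by_cases hgt : pyGtOpt (some ch) a = true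
        · rw [if_pos hgt]; simp [pyGtOpt]
        · rw [if_neg hgt]; exact (Bool.not_eq_true _) ▸ hgt
      have hbody := ih (if pyGtOpt (some ch) a then some ch else a) (some ch) hinv
      simpa [hg, maxStep] using hbody

theorem maxStep_eq_some (a : Option Char) (x : Char) :
    ∃ y, maxStep a x = some y ∧ x ≤ y ∧ ∀ z, a = some z → z ≤ y := by
  cases a with
  | none => exact ⟨x, by simp [maxStep, pyGtOpt], le_refl x, by simp⟩
  | some z =>
    by_cases hlt : z < x
    · exact ⟨x, by simp [maxStep, pyGtOpt, hlt], le_refl x,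
        by intro w hw; cases hw; exact le_of_lt hlt⟩
    · exact ⟨z, by simp [maxStep, pyGtOpt, hlt], not_lt.mp hlt,
        by intro w hw; cases hw; exact le_refl z⟩

theorem maxFold_spec (l : List Char) : ∀ (a : Option Char) (c : Char),
    l.foldl maxStep a = some c →
    (a = some c ∨ c ∈ l) ∧ (∀ x ∈ l, x ≤ c) ∧ (∀ y, a = some y → y ≤ c) := by
  induction l with
  | nil =>
    intro a c h
    simp only [List.foldl_nil] at h
    refine ⟨Or.inl h, by simp, ?_⟩
    intro y hy
    rw [h] at hy
    exact le_of_eq (Option.some.inj hy).symm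
  | cons x t ih =>
    intro a c h
    simp only [List.foldl_cons] at h
    obtain ⟨h1, h2, h3⟩ := ih (maxStep a x) c h
    obtain ⟨y, hy, hxy, hzy⟩ := maxStep_eq_some a x
    have hyc : y ≤ c := h3 y hy
    refine ⟨?_, ?_, fun z hz => le_trans (hzy z hz) hyc⟩
    · rcases h1 with h1 | h1
      · rw [hy] at h1
        -- maxStep a x = some c: either it picked x or kept a
        by_cases hgt : pyGtOpt (some x) a = true
        · have : maxStep a x = some x := by simp [maxStep, hgt]
          rw [hy] at this
          exact Or.inr (by simp [← Option.some.inj h1, ← Option.some.inj this])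
        · have : maxStep a x = a := by
            simp only [Bool.not_eq_true] at hgt; simp [maxStep, hgt]
          rw [hy] at this; rw [← this, h1]; exact Or.inl rfl
      · exact Or.inr (List.mem_cons_of_mem _ h1)
    · intro w hw
      rcases List.mem_cons.mp hw with hw | hw
      · exact hw ▸ le_trans hxy hyc
      · exact h2 w hw

theorem maxFold_some_ne_none (t : List Char) : ∀ (y : Char),
    t.foldl maxStep (some y) ≠ none := by
  induction t with
  | nil => intro y h; cases h
  | cons x t ih =>
    intro y
    obtain ⟨w, hw, _, _⟩ := maxStep_eq_some (some y) x
    simp only [List.foldl_cons, hw]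
    exact ih w

-- B's dict fold: key membership = some non-ignored character of the processed suffix
theorem part6B_keys (G : List Char) (k : Char) : ∀ (l : List Char) (i : Int)
    (d : PySem.Dict Char Int),
    (k ∈ ((PySem.List.enumerate l i).foldl
      (fun (d : PySem.Dict Char Int) p =>
        if p.2 ∉ G ∧ d.contains p.2 = false then d.insert p.2 p.1 else d) d).keys
     ↔ k ∈ d.keys ∨ (k ∈ l ∧ k ∉ G)) := by
  intro l
  induction l with
  | nil => intro i d; simp [PySem.List.enumerate_nil]
  | cons ch t ih =>
    intro i d
    rw [PySem.List.enumerate_cons, List.foldl_cons]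
    by_cases hcond : ch ∉ G ∧ d.contains ch = false
    · rw [if_pos hcond, ih]
      rw [PySem.Dict.mem_keys_insert]
      have hchg : ch ∉ G := hcond.1
      constructor
      · rintro ((rfl | hk) | ⟨hkt, hkg⟩)
        · exact Or.inr ⟨List.mem_cons_self, hchg⟩
        · exact Or.inl hk
        · exact Or.inr ⟨List.mem_cons_of_mem _ hkt, hkg⟩
      · rintro (hk | ⟨hkl, hkg⟩)
        · exact Or.inl (Or.inr hk)
        · rcases List.mem_cons.mp hkl with rfl | hkt
          · exact Or.inl (Or.inl rfl)
          · exact Or.inr ⟨hkt, hkg⟩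
    · rw [if_neg hcond, ih]
      rcases Decidable.not_and_iff_or_not.mp hcond with hg | hc
      · rw [Decidable.not_not] at hg
        constructor
        · rintro (hk | ⟨hkt, hkg⟩)
          · exact Or.inl hk
          · exact Or.inr ⟨List.mem_cons_of_mem _ hkt, hkg⟩
        · rintro (hk | ⟨hkl, hkg⟩)
          · exact Or.inl hk
          · rcases List.mem_cons.mp hkl with rfl | hkt
            · exact absurd hg hkg
            · exact Or.inr ⟨hkt, hkg⟩
      · have hmem : ch ∈ d.keys := by
          rw [← PySem.Dict.contains_iff_mem_keys]
          cases hb : d.contains ch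
          · exact absurd hb hc
          · rfl
        constructor
        · rintro (hk | ⟨hkt, hkg⟩)
          · exact Or.inl hk
          · exact Or.inr ⟨List.mem_cons_of_mem _ hkt, hkg⟩
        · rintro (hk | ⟨hkl, hkg⟩)
          · exact Or.inl hk
          · rcases List.mem_cons.mp hkl with rfl | hkt
            · exact Or.inl hmem
            · exact Or.inr ⟨hkt, hkg⟩

-- once a key is present, B's fold never touches it again
theorem part6B_get_stable (G : List Char) (c : Char) : ∀ (l : List Char) (i : Int)
    (d : PySem.Dict Char Int), d.contains c = true →
    ((PySem.List.enumerate l i).foldl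
      (fun (d : PySem.Dict Char Int) p =>
        if p.2 ∉ G ∧ d.contains p.2 = false then d.insert p.2 p.1 else d) d).get? c
    = d.get? c := by
  intro l
  induction l with
  | nil => intro i d _; simp [PySem.List.enumerate_nil]
  | cons ch t ih =>
    intro i d hc
    rw [PySem.List.enumerate_cons, List.foldl_cons]
    by_cases hcond : ch ∉ G ∧ d.contains ch = false
    · rw [if_pos hcond]
      have hne : c ≠ ch := by
        rintro rfl; rw [hc] at hcond; exact absurd hcond.2 (by simp)
      have hc' : (d.insert ch i).contains c = true := by
        rw [PySem.Dict.contains_insert, hc]; simp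
      rw [ih (i + 1) _ hc', PySem.Dict.get?_insert_of_ne _ _ hne]
    · rw [if_neg hcond]; exact ih (i + 1) d hc

-- the first-occurrence index B stores for a non-ignored character c is exactly the
-- index A's second loop computes
theorem part6B_get (G : List Char) (c : Char) (hcg : c ∉ G) : ∀ (l : List Char) (i : Int)
    (d : PySem.Dict Char Int), c ∈ l → d.contains c = false →
    ((PySem.List.enumerate l i).foldl
      (fun (d : PySem.Dict Char Int) p =>
        if p.2 ∉ G ∧ d.contains p.2 = false then d.insert p.2 p.1 else d) d).get? c
    = some (part6FindIdx c l i) := by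
  intro l
  induction l with
  | nil => intro i d hc _; cases hc
  | cons ch t ih =>
    intro i d hcl hcd
    rw [PySem.List.enumerate_cons, List.foldl_cons]
    by_cases hc : c = ch
    · subst hc
      rw [if_pos ⟨hcg, hcd⟩]
      have : (d.insert c i).contains c = true := PySem.Dict.contains_insert_self _ _ _
      rw [part6B_get_stable G c t (i + 1) _ this, PySem.Dict.get?_insert_self]
      simp [part6FindIdx]
    · have hct : c ∈ t := by
        rcases List.mem_cons.mp hcl with h | h
        · exact absurd h hc
        · exact h
      have hfind : part6FindIdx c (ch :: t) i = part6FindIdx c t (i + 1) := by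
        simp [part6FindIdx, hc]
      rw [hfind]
      by_cases hcond : ch ∉ G ∧ d.contains ch = false
      · rw [if_pos hcond]
        have : (d.insert ch i).contains c = false := by
          rw [PySem.Dict.contains_insert, hcd]
          simp [hc]
        exact ih (i + 1) _ hct this
      · rw [if_neg hcond]; exact ih (i + 1) d hct hcd

-- ===== VERDICT (by name: the statement is the Claim_ definition above) =====
theorem part6_spec : Claim_equal_part6 := by
  unfold Claim_equal_part6
  intro s ig _
  unfold Spec_part6 part6 part6_alt
  simp only []
  have hA := part6A_fold ig.toList s.toList none none rfl
  rw [hA]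
  have hkeys := part6B_keys ig.toList
  set first := (PySem.List.enumerate s.toList 0).foldl
    (fun (d : PySem.Dict Char Int) p =>
      if p.2 ∉ ig.toList ∧ d.contains p.2 = false then d.insert p.2 p.1 else d)
    PySem.Dict.empty with hfirst
  have hmemF : ∀ k : Char, k ∈ first.keys ↔ k ∈ s.toList.filter (fun c => decide (c ∉ ig.toList)) := by
    intro k
    rw [hfirst, hkeys k s.toList 0 PySem.Dict.empty]
    simp [List.mem_filter]
  cases hF : (s.toList.filter (fun c => decide (c ∉ ig.toList))).foldl maxStep none with
  | none =>
    -- all characters ignored: both return (none, none)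
    have hFnil : s.toList.filter (fun c => decide (c ∉ ig.toList)) = [] := by
      cases hfe : s.toList.filter (fun c => decide (c ∉ ig.toList)) with
      | nil => rfl
      | cons x t =>
        rw [hfe, List.foldl_cons] at hF
        have hsx : maxStep none x = some x := by simp [maxStep, pyGtOpt]
        rw [hsx] at hF
        exact absurd hF (maxFold_some_ne_none t x)
    have : first.keys = [] := by
      apply List.eq_nil_iff_forall_not_mem.mpr
      intro k hk
      rw [hmemF k, hFnil] at hk
      cases hk
    rw [this]
    rfl
  | some c =>
    obtain ⟨h1, h2, _⟩ := maxFold_spec _ none c hF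
    have hcF : c ∈ s.toList.filter (fun c => decide (c ∉ ig.toList)) := by
      rcases h1 with h1 | h1
      · cases h1
      · exact h1
    have hcK : c ∈ first.keys := (hmemF c).mpr hcF
    cases hM : PySem.List.max? first.keys (fun k => k) with
    | none =>
      rw [PySem.List.max?_eq_none_iff] at hM
      rw [hM] at hcK
      cases hcK
    | some m =>
      have hmK : m ∈ first.keys := PySem.List.max?_mem hM
      have hmc : m = c := by
        have hmF : m ∈ s.toList.filter (fun c => decide (c ∉ ig.toList)) := (hmemF m).mp hmK
        have h1' : m ≤ c := h2 m hmF
        have h2' : c ≤ m := PySem.List.max?_isMax hM c hcK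
        exact le_antisymm h1' h2'
      subst hmc
      -- indices agree
      have hcmem : m ∈ s.toList := (List.mem_filter.mp hcF).1
      have hcig : m ∉ ig.toList := by
        have := (List.mem_filter.mp hcF).2
        simpa using this
      have hget : first.get? m = some (part6FindIdx m s.toList 0) := by
        rw [hfirst]
        exact part6B_get ig.toList m hcig s.toList 0 PySem.Dict.empty hcmem
          (PySem.Dict.contains_empty m)
      show (some (String.ofList [m]), some (part6FindIdx m s.toList 0))
        = (some (String.ofList [m]), some (first.getD m 0))
      rw [PySem.Dict.getD_eq_get?_getD, hget]
      rfl
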